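-- pv_equiv track=rewrite | github.com/erickllaureano/TestSectionA | objects_ordering.py | ordering_data_by_level
-- ===== SOURCE A (Python) =====
-- levels = ['One', 'Two', 'Three', 'Four', 'Five',
--           'Six', 'Seven', 'Eight', 'Nine', 'Ten']
--
-- priorities = ['Highest', 'High', 'Medium', 'Low', 'Lowest']
--
-- def searching_move_data(temporary_data, pre_ordered_data, key, value):
--     index_to_delet = 0
--     while index_to_delet < len(temporary_data):
--         key_value = temporary_data[index_to_delet].get(
--             key, ''
--         )
--         if key_value == value:
--             pre_ordered_data.append(
--                 temporary_data.pop(index_to_delet)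
--             )
--             index_to_delet = 0
--         else:
--             index_to_delet += 1
--
-- def ordering_data_by_priority(pre_data_list):
--     pre_ordered_data = list()
--     temporary_data = pre_data_list[:]
--     for priority in priorities:
--         searching_move_data(
--             temporary_data,
--             pre_ordered_data,
--             'priority',
--             priority
--         )
--     pre_ordered_data += temporary_data
--     return pre_ordered_data
--
-- def ordering_data_by_level(data_list):
--     ordered_data = list()
--     temporary_data = data_list[:]
--     for level in levels:
--         pre_ordered_data = list()
--         searching_move_data(
--             temporary_data,
--             pre_ordered_data,
--             'level',
--             level
--         )
--         ordered_data += ordering_data_by_priority(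
--             pre_ordered_data
--         )
--     return ordered_data
-- ===== SOURCE B (Python) =====
-- levels = ['One', 'Two', 'Three', 'Four', 'Five',
--           'Six', 'Seven', 'Eight', 'Nine', 'Ten']
--
-- priorities = ['Highest', 'High', 'Medium', 'Low', 'Lowest']
--
--
-- def ordering_data_by_level(data_list):
--     def block(level):
--         group = [r for r in data_list if r.get('level', '') == level]
--         ranked = [r for p in priorities for r in group if r.get('priority', '') == p]
--         rest = [r for r in group if r.get('priority', '') not in priorities]
--         return ranked + rest
--     return [r for level in levels for r in block(level)]
-- ===== Notes on version B (the rewrite author's own statement) =====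
-- stated objective: simpler
-- what changed: A repeatedly scans a mutable residual list with pop-and-reset-index extraction loops across levels and priorities; B is a pure declarative version that builds each level block directly by filtering the original list per level and per priority bucket (unknown priorities last), with no mutation or residual state.
import Mathlib
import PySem

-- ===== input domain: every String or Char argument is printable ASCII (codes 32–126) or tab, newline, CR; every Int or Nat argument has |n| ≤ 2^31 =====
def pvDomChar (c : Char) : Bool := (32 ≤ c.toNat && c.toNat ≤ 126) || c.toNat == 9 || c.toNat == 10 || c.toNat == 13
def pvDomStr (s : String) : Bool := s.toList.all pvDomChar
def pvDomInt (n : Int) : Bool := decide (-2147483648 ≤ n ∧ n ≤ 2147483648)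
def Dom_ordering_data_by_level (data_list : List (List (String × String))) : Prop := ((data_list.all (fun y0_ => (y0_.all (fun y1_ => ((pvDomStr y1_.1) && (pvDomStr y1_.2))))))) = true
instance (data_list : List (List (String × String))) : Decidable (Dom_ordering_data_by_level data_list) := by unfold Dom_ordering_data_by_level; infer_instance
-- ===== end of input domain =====

-- B replaces A's destructive scan-and-pop extraction loops by pure per-bucket
-- filters of the original list (objective: simpler).

-- dict.get(key, ''): first-match lookup on the association-list record (PySem.Dict semantics)
def pvGet (r : List (String × String)) (k : String) : String :=
  PySem.Dict.getD (PySem.Dict.mk r) k ""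

def pvLevels : List String :=
  ["One", "Two", "Three", "Four", "Five", "Six", "Seven", "Eight", "Nine", "Ten"]

def pvPriorities : List String := ["Highest", "High", "Medium", "Low", "Lowest"]

-- ===== PORT A =====
-- searching_move_data: while loop with index reset on pop; returns (temporary_data, pre_ordered_data)
def pvSmd (t acc : List (List (String × String))) (key value : String) (i : Nat) :
    List (List (String × String)) × List (List (String × String)) :=
  if h : i < t.length then
    if pvGet t[i] key == value then
      pvSmd (t.eraseIdx i) (acc ++ [t[i]]) key value 0
    else
      pvSmd t acc key value (i + 1)
  else
    (t, acc)
termination_by (t.length, t.length - i)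
decreasing_by
  · left; simp [List.length_eraseIdx, h]; omega
  · right; omega

def pvObp (pre_data_list : List (List (String × String))) : List (List (String × String)) :=
  let st := pvPriorities.foldl
    (fun (st : List (List (String × String)) × List (List (String × String))) priority =>
      let r := pvSmd st.2 st.1 "priority" priority 0
      (r.2, r.1))
    ([], pre_data_list)
  st.1 ++ st.2

def ordering_data_by_level (data_list : List (List (String × String))) :
    List (List (String × String)) :=
  (pvLevels.foldl
    (fun (st : List (List (String × String)) × List (List (String × String))) level =>
      let r := pvSmd st.2 [] "level" level 0
      (st.1 ++ pvObp r.2, r.1))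
    ([], data_list)).1

-- ===== PORT B =====
def pvBlock (data_list : List (List (String × String))) (level : String) :
    List (List (String × String)) :=
  let group := data_list.filter (fun r => pvGet r "level" == level)
  let ranked := pvPriorities.flatMap
    (fun p => group.filter (fun r => pvGet r "priority" == p))
  let rest := group.filter (fun r => !(pvPriorities.contains (pvGet r "priority")))
  ranked ++ rest

def ordering_data_by_level_alt (data_list : List (List (String × String))) :
    List (List (String × String)) :=
  pvLevels.flatMap (fun level => pvBlock data_list level)

-- ===== PRECONDITION & SPEC =====
def Spec_ordering_data_by_level (data_list : List (List (String × String))) (out : List (List (String × String))) : Prop := out = ordering_data_by_level_alt data_list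
instance (data_list : List (List (String × String))) (out : List (List (String × String))) : Decidable (Spec_ordering_data_by_level data_list out) := by unfold Spec_ordering_data_by_level; infer_instance

-- ===== CLAIM (what is proved, stated in full; the proofs are below) =====
def Claim_equal_ordering_data_by_level : Prop := ∀ (data_list : List (List (String × String))), Dom_ordering_data_by_level data_list → Spec_ordering_data_by_level data_list (ordering_data_by_level data_list)

-- ===== LEMMAS AND PROOFS =====

-- searching_move_data moves exactly the matching records, in order (stable partition).
theorem pvSmd_spec (t acc : List (List (String × String))) (key value : String) (i : Nat)
    (hpre : (t.take i).all (fun r => !(pvGet r key == value)) = true) :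
    pvSmd t acc key value i =
      (t.filter (fun r => !(pvGet r key == value)),
       acc ++ t.filter (fun r => pvGet r key == value)) := by
  fun_induction pvSmd t acc key value i with
  | case1 t acc i h hm ih =>
    rw [ih (by simp)]
    have h1 : (t.take i).filter (fun r => pvGet r key == value) = [] := by
      rw [List.filter_eq_nil_iff]
      intro a ha hc
      have := (List.all_eq_true.mp hpre) a ha
      simp [hc] at this
    have h2 : (t.take i).filter (fun r => !(pvGet r key == value)) = t.take i := by
      rw [List.filter_eq_self]
      intro a ha; exact (List.all_eq_true.mp hpre) a ha
    have herase : t.eraseIdx i = t.take i ++ t.drop (i + 1) :=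
      List.eraseIdx_eq_take_drop_succ t i
    have hA : t.filter (fun r => pvGet r key == value)
        = t[i] :: (t.eraseIdx i).filter (fun r => pvGet r key == value) := by
      have e1 : t.filter (fun r => pvGet r key == value)
          = t[i] :: (t.drop (i + 1)).filter (fun r => pvGet r key == value) := by
        conv_lhs => rw [← List.take_append_drop i t, List.drop_eq_getElem_cons h]
        rw [List.filter_append, h1, List.filter_cons]
        simp [hm]
      have e2 : (t.eraseIdx i).filter (fun r => pvGet r key == value)
          = (t.drop (i + 1)).filter (fun r => pvGet r key == value) := by
        rw [herase, List.filter_append, h1, List.nil_append]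
      rw [e1, e2]
    have hB : t.filter (fun r => !(pvGet r key == value))
        = (t.eraseIdx i).filter (fun r => !(pvGet r key == value)) := by
      have e1 : t.filter (fun r => !(pvGet r key == value))
          = t.take i ++ (t.drop (i + 1)).filter (fun r => !(pvGet r key == value)) := by
        conv_lhs => rw [← List.take_append_drop i t, List.drop_eq_getElem_cons h]
        rw [List.filter_append, h2, List.filter_cons]
        simp [hm]
      have e2 : (t.eraseIdx i).filter (fun r => !(pvGet r key == value))
          = t.take i ++ (t.drop (i + 1)).filter (fun r => !(pvGet r key == value)) := by
        rw [herase, List.filter_append, h2]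
      rw [e1, e2]
    rw [hA, hB]
    simp
  | case2 t acc i h hm ih =>
    apply ih
    rw [List.take_add_one]
    simp only [List.all_append, hpre, Bool.true_and]
    simp [List.getElem?_eq_getElem h, hm]
  | case3 t acc i h =>
    have hall : t.all (fun r => !(pvGet r key == value)) = true := by
      rwa [List.take_of_length_le (by omega)] at hpre
    have h1 : t.filter (fun r => !(pvGet r key == value)) = t := by
      rw [List.filter_eq_self]; exact fun a ha => (List.all_eq_true.mp hall) a ha
    have h2 : t.filter (fun r => pvGet r key == value) = [] := by
      rw [List.filter_eq_nil_iff]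
      intro a ha hc
      have := (List.all_eq_true.mp hall) a ha
      simp [hc] at this
    rw [h1, h2]
    simp

-- filtering the residual (records whose key-value is outside S) for a fresh value v
theorem pv_filter_fresh (O : List (List (String × String))) (g : List (String × String) → String)
    (S : List String) (v : String) (hv : S.contains v = false) :
    (O.filter (fun r => !(S.contains (g r)))).filter (fun r => g r == v)
      = O.filter (fun r => g r == v) := by
  rw [List.filter_filter]
  apply List.filter_congr
  intro r _
  by_cases hc : g r = v
  · have hm : v ∉ S := by simpa using hv
    simp [hc, hm]
  · simp [hc]

theorem pv_filter_extend (O : List (List (String × String))) (g : List (String × String) → String)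
    (S : List String) (v : String) :
    (O.filter (fun r => !(S.contains (g r)))).filter (fun r => !(g r == v))
      = O.filter (fun r => !((S ++ [v]).contains (g r))) := by
  rw [List.filter_filter]
  apply List.filter_congr
  intro r _
  by_cases hc : g r = v <;> by_cases hs : g r ∈ S <;> simp [hc, hs]

-- invariant of ordering_data_by_priority's loop over the priorities list
theorem pv_loopP (vs : List String) (S : List String) (O acc : List (List (String × String)))
    (hnd : vs.Nodup) (hdisj : ∀ v ∈ vs, S.contains v = false) :
    vs.foldl
      (fun (st : List (List (String × String)) × List (List (String × String))) priority =>
        let r := pvSmd st.2 st.1 "priority" priority 0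
        (r.2, r.1))
      (acc, O.filter (fun r => !(S.contains (pvGet r "priority")))) =
    (acc ++ vs.flatMap (fun p => O.filter (fun r => pvGet r "priority" == p)),
     O.filter (fun r => !((S ++ vs).contains (pvGet r "priority")))) := by
  induction vs generalizing S acc with
  | nil => simp
  | cons v vs ih =>
    have h1 := pvSmd_spec (O.filter (fun r => !(S.contains (pvGet r "priority"))))
      acc "priority" v 0 (by simp)
    rw [pv_filter_fresh O (fun r => pvGet r "priority") S v (hdisj v (by simp)),
        pv_filter_extend O (fun r => pvGet r "priority") S v] at h1
    rw [List.foldl_cons]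
    simp only [h1]
    rw [ih (S ++ [v]) _ (hnd.of_cons)]
    · simp [List.append_assoc]
    · intro w hw
      have hwv : w ≠ v := fun he => (List.nodup_cons.mp hnd).1 (he ▸ hw)
      have hws : w ∉ S := by simpa using hdisj w (by simp [hw])
      simp [hwv, hws]

-- ordering_data_by_priority is the priority-bucket filters followed by the unknown-priority rest
theorem pvObp_spec (pre : List (List (String × String))) :
    pvObp pre =
      pvPriorities.flatMap (fun p => pre.filter (fun r => pvGet r "priority" == p))
        ++ pre.filter (fun r => !(pvPriorities.contains (pvGet r "priority"))) := by
  unfold pvObp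
  have h0 : pre = pre.filter (fun r => !(([] : List String).contains (pvGet r "priority"))) := by
    simp
  conv_lhs => rw [h0]
  rw [pv_loopP pvPriorities [] pre [] (by decide) (by simp)]
  simp

-- invariant of the outer loop over the levels list
theorem pv_loopL (vs : List String) (S : List String) (O ord : List (List (String × String)))
    (hnd : vs.Nodup) (hdisj : ∀ v ∈ vs, S.contains v = false) :
    vs.foldl
      (fun (st : List (List (String × String)) × List (List (String × String))) level =>
        let r := pvSmd st.2 [] "level" level 0
        (st.1 ++ pvObp r.2, r.1))
      (ord, O.filter (fun r => !(S.contains (pvGet r "level")))) =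
    (ord ++ vs.flatMap (fun lv =>
        pvObp (O.filter (fun r => pvGet r "level" == lv))),
     O.filter (fun r => !((S ++ vs).contains (pvGet r "level")))) := by
  induction vs generalizing S ord with
  | nil => simp
  | cons v vs ih =>
    have h1 := pvSmd_spec (O.filter (fun r => !(S.contains (pvGet r "level"))))
      [] "level" v 0 (by simp)
    rw [pv_filter_fresh O (fun r => pvGet r "level") S v (hdisj v (by simp)),
        pv_filter_extend O (fun r => pvGet r "level") S v] at h1
    rw [List.foldl_cons]
    simp only [h1, List.nil_append]
    rw [ih (S ++ [v]) _ (hnd.of_cons)]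
    · simp [List.append_assoc]
    · intro w hw
      have hwv : w ≠ v := fun he => (List.nodup_cons.mp hnd).1 (he ▸ hw)
      have hws : w ∉ S := by simpa using hdisj w (by simp [hw])
      simp [hwv, hws]

-- ===== VERDICT (by name: the statement is the Claim_ definition above) =====
theorem ordering_data_by_level_spec : Claim_equal_ordering_data_by_level := by
  intro data_list _
  unfold Spec_ordering_data_by_level ordering_data_by_level ordering_data_by_level_alt
  have h0 : data_list = data_list.filter (fun r => !(([] : List String).contains (pvGet r "level"))) := by
    simp
  conv_lhs => rw [h0]
  rw [pv_loopL pvLevels [] data_list [] (by decide) (by simp)]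
  simp only [List.nil_append]
  congr 1
  funext lv
  rw [pvObp_spec]
  simp [pvBlock]
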